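-- pv_equiv track=rewrite | github.com/ssfaruqu/codedocproj | testing/funcs_for_testing.py | func11
-- ===== SOURCE A (Python) =====
-- import math as math
--
-- def func11(grid, reverse):
--     def process_row(row):
--         if len(row) == 1:
--             return [row[0], row[0]]
--         elif len(row) == 2:
--             return [row[1], row[0]]
--         elif len(row) == 0:
--             return row
--
--         mid = math.floor(len(row)/2)
--         lower = row[0:mid]
--         upper = row[mid:]
--
--         ret = process_row(lower) + process_row(upper)
--
--         return ret
--
--     for i in range(len(grid)):
--         grid[i] = process_row(grid[i])
--
--         if reverse:
--             low = 0
--             high = len(grid[i]) - 1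
--             while low < high:
--                 temp = grid[i][low]
--                 grid[i][low] = grid[i][high]
--                 grid[i][high] = temp
--                 low += 1
--                 high -= 1
--
--     return grid
-- ===== SOURCE B (Python) =====
-- def func11(grid, reverse):
--     # Like A, mutates grid in place (grid[i] is replaced); equivalence is about the return value.
--     for i in range(len(grid)):
--         row = grid[i]
--         out = []
--         stack = [(0, len(row))]
--         while stack:
--             lo, hi = stack.pop()
--             n = hi - lo
--             if n == 0:
--                 continue
--             elif n == 1:
--                 out.append(row[lo])
--                 out.append(row[lo])
--             elif n == 2:
--                 out.append(row[lo + 1])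
--                 out.append(row[lo])
--             else:
--                 mid = lo + n // 2
--                 stack.append((mid, hi))
--                 stack.append((lo, mid))
--         if reverse:
--             out.reverse()
--         grid[i] = out
--     return grid
-- ===== Notes on version B (the rewrite author's own statement) =====
-- stated objective: faster
-- what changed: Per row, A's recursive function rebuilds lists with slicing and concatenation at every level (O(n log n) per row); B does one iterative pass with an explicit stack of index ranges, appending each base-case result once to a single output list, followed by one in-place reverse instead of A's index-swap while-loop.
import Mathlib
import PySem

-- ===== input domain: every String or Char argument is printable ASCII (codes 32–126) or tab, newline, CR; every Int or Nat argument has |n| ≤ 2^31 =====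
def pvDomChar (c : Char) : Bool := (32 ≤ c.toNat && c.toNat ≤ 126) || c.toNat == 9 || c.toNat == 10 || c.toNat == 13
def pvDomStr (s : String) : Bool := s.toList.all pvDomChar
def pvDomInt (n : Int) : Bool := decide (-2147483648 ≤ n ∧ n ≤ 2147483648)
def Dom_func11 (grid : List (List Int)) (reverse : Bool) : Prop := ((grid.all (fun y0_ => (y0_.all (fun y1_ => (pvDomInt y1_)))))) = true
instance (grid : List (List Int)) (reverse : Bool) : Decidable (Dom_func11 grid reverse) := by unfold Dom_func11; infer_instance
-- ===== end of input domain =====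

-- B replaces A's per-row recursion (slicing + list concatenation) by one explicit-stack pass
-- over index ranges that appends base-case results into a single output list, then one reverse.
-- Both A and B mutate the argument grid in place (grid[i] is reassigned); the equivalence
-- proved here is about the return value.
-- All three loops/recursions are written with a fuel parameter (structural recursion) purely
-- as a totality guard; the fuel passed by func11 / func11_alt is always sufficient.

-- ===== PORT A =====
-- process_row: recursion with slices, exactly as in A.  row[0]/row[1] are read with the total
-- pyGetD: the indices are in range whenever those branches run, so Python never raises there.
-- Recursion depth is < row.length, so fuel = row.length (passed by processA) is sufficient.
def processAF (fuel : Nat) (row : List Int) : List Int :=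
  match fuel with
  | 0 => []   -- never reached with sufficient fuel
  | fuel + 1 =>
    if row.length = 1 then
      [PySem.List.pyGetD row 0 0, PySem.List.pyGetD row 0 0]
    else if row.length = 2 then
      [PySem.List.pyGetD row 1 0, PySem.List.pyGetD row 0 0]
    else if row.length = 0 then
      row
    else
      let mid : Int := PySem.Int.floordiv (row.length : Int) 2   -- math.floor(len(row)/2)
      let lower := PySem.List.slice row (some 0) (some mid)      -- row[0:mid]
      let upper := PySem.List.slice row (some mid) none          -- row[mid:]
      processAF fuel lower ++ processAF fuel upper

def processA (row : List Int) : List Int := processAF row.length row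

-- A's in-place reversing while-loop.  Reads/writes use the total pyGetD/pySetD: whenever the
-- swap body runs, 0 ≤ low < high ≤ len-1, so they coincide with Python's l[i] / l[i] = v.
-- The loop runs ≤ ceil(len/2) times, so fuel = r.length (passed by func11) is sufficient.
def swapLoopF (fuel : Nat) (l : List Int) (low high : Int) : List Int :=
  match fuel with
  | 0 => l   -- never reached with sufficient fuel
  | fuel + 1 =>
    if low < high then
      let temp := PySem.List.pyGetD l low 0
      let l1 := PySem.List.pySetD l low (PySem.List.pyGetD l high 0)
      let l2 := PySem.List.pySetD l1 high temp
      swapLoopF fuel l2 (low + 1) (high - 1)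
    else l

-- the for-loop writes grid[i] from grid[i] alone, hence it is a map over the rows
def func11 (grid : List (List Int)) (reverse : Bool) : List (List Int) :=
  grid.map (fun row =>
    let r := processA row
    if reverse then swapLoopF r.length r 0 ((r.length : Int) - 1) else r)

-- ===== PORT B =====
-- B's while-loop over the explicit stack of index ranges; the head of the Lean list is the top
-- of the Python stack (list.pop() pops the last-pushed pair).  row[lo] is in range on every
-- pair the loop pops in a run started from (0, len(row)), so List.getD is exact there.
-- The loop runs < 2*len(row)+1 times, so that fuel (passed by func11_alt) is sufficient.
def altLoopF (fuel : Nat) (row : List Int) (stack : List (Nat × Nat)) (out : List Int) : List Int :=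
  match fuel with
  | 0 => out   -- never reached with sufficient fuel
  | fuel + 1 =>
    match stack with
    | [] => out
    | (lo, hi) :: rest =>
      let n := hi - lo
      if n = 0 then altLoopF fuel row rest out
      else if n = 1 then altLoopF fuel row rest (out ++ [row.getD lo 0, row.getD lo 0])
      else if n = 2 then altLoopF fuel row rest (out ++ [row.getD (lo + 1) 0, row.getD lo 0])
      else altLoopF fuel row ((lo, lo + n / 2) :: (lo + n / 2, hi) :: rest) out

def func11_alt (grid : List (List Int)) (reverse : Bool) : List (List Int) :=
  grid.map (fun row =>
    let out := altLoopF (2 * row.length + 1) row [(0, row.length)] []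
    if reverse then out.reverse else out)

-- ===== PRECONDITION & SPEC =====
def Spec_func11 (grid : List (List Int)) (reverse : Bool) (out : List (List Int)) : Prop := out = func11_alt grid reverse
instance (grid : List (List Int)) (reverse : Bool) (out : List (List Int)) : Decidable (Spec_func11 grid reverse out) := by unfold Spec_func11; infer_instance

-- ===== CLAIM (what is proved, stated in full; the proofs are below) =====
def Claim_equal_func11 : Prop := ∀ (grid : List (List Int)) (reverse : Bool), Dom_func11 grid reverse → Spec_func11 grid reverse (func11 grid reverse)

-- ===== LEMMAS AND PROOFS =====

-- the weight whose stack-sum bounds the number of iterations B's loop still has to do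
def segW (p : Nat × Nat) : Nat := max 1 (2 * (p.2 - p.1) - 1)
def stackW (stack : List (Nat × Nat)) : Nat := (stack.map segW).sum

-- process_row's result does not depend on the fuel, as long as it is ≥ row.length
lemma processAF_congr (row : List Int) (f g : Nat)
    (hf : row.length ≤ f) (hg : row.length ≤ g) : processAF f row = processAF g row := by
  induction hn : row.length using Nat.strong_induction_on generalizing row f g with
  | _ n ih =>
  subst hn
  match f, hf with
  | 0, hf =>
    have hrow : row = [] := List.length_eq_zero_iff.mp (by omega)
    subst hrow
    cases g with
    | zero => rfl
    | succ g => simp [processAF]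
  | f + 1, hf =>
    match g, hg with
    | 0, hg =>
      have hrow : row = [] := List.length_eq_zero_iff.mp (by omega)
      subst hrow
      simp [processAF]
    | g + 1, hg =>
      show processAF (f+1) row = processAF (g+1) row
      rw [processAF, processAF]
      by_cases h1 : row.length = 1
      · simp [h1]
      · by_cases h2 : row.length = 2
        · simp [h2]
        · by_cases h0 : row.length = 0
          · simp [h0]
          · simp only [h1, h2, h0, if_false]
            have h3 : 3 ≤ row.length := by omega
            rw [show PySem.Int.floordiv (row.length : Int) 2 = ((row.length / 2 : Nat) : Int) from
              PySem.Int.floordiv_natCast row.length 2]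
            simp only [PySem.List.slice_zero_start]
            rw [PySem.List.slice_to_natCast, PySem.List.slice_from_natCast]
            have hlow : (row.take (row.length / 2)).length < row.length := by
              simp only [List.length_take]; omega
            have hup : (row.drop (row.length / 2)).length < row.length := by
              simp only [List.length_drop]; omega
            rw [ih (row.take (row.length / 2)).length hlow (row.take (row.length / 2)) f g
                  (by rw [List.length_take]; omega) (by rw [List.length_take]; omega) rfl,
                ih (row.drop (row.length / 2)).length hup (row.drop (row.length / 2)) f g
                  (by rw [List.length_drop]; omega) (by rw [List.length_drop]; omega) rfl]

-- processA's equations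
lemma processA_nil : processA ([] : List Int) = [] := by
  simp [processA, processAF]

lemma processA_one (x : Int) : processA [x] = [x, x] := by
  simp [processA, processAF, PySem.List.pyGetD]

lemma processA_two (x y : Int) : processA [x, y] = [y, x] := by
  simp [processA, processAF, PySem.List.pyGetD, PySem.List.pyIdx?, PySem.List.pyGet?]

lemma processA_split (l : List Int) (h : 3 ≤ l.length) :
    processA l = processA (l.take (l.length / 2)) ++ processA (l.drop (l.length / 2)) := by
  unfold processA
  obtain ⟨f, hf⟩ : ∃ f, l.length = f + 1 := ⟨l.length - 1, by omega⟩
  conv_lhs => rw [hf]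
  rw [processAF]
  rw [if_neg (by omega), if_neg (by omega), if_neg (by omega)]
  rw [show PySem.Int.floordiv (l.length : Int) 2 = ((l.length / 2 : Nat) : Int) from
    PySem.Int.floordiv_natCast l.length 2]
  simp only [PySem.List.slice_zero_start]
  rw [PySem.List.slice_to_natCast, PySem.List.slice_from_natCast]
  rw [processAF_congr (l.take (l.length / 2)) f (l.take (l.length / 2)).length
        (by rw [List.length_take]; omega) (Nat.le_refl _),
      processAF_congr (l.drop (l.length / 2)) f (l.drop (l.length / 2)).length
        (by rw [List.length_drop]; omega) (Nat.le_refl _)]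

-- splitting a segment of size ≥ 3 strictly decreases the stack weight
lemma splitW_lt (lo hi : Nat) (h : 3 ≤ hi - lo) :
    segW (lo, lo + (hi - lo) / 2) + segW (lo + (hi - lo) / 2, hi) + 1 ≤ segW (lo, hi) := by
  unfold segW
  simp only [Nat.add_sub_cancel_left]
  have ha1 : 1 ≤ (hi - lo) / 2 := Nat.one_le_div_iff (by omega) |>.mpr (by omega)
  have ha2 : (hi - lo) / 2 * 2 ≤ hi - lo := Nat.div_mul_le_self _ 2
  have hb : hi - (lo + (hi - lo) / 2) = (hi - lo) - (hi - lo) / 2 := by omega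
  rw [hb]
  generalize hA : (hi - lo) / 2 = a at *
  generalize hN : hi - lo = n at *
  rw [Nat.max_eq_right (by omega), Nat.max_eq_right (by omega), Nat.max_eq_right (by omega)]
  omega

-- the invariant of B's stack loop: with enough fuel it emits processA of each pending segment
lemma altLoopF_eq (f : Nat) (row : List Int) (stack : List (Nat × Nat)) (out : List Int)
    (hfuel : stackW stack ≤ f) (hst : ∀ p ∈ stack, p.2 ≤ row.length) :
    altLoopF f row stack out
      = out ++ (stack.map (fun p => processA ((row.drop p.1).take (p.2 - p.1)))).flatten := by
  induction f generalizing stack out with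
  | zero =>
    cases stack with
    | nil => simp [altLoopF]
    | cons p rest =>
      exfalso
      have : 1 ≤ stackW (p :: rest) := by
        have h1 : 1 ≤ segW p := Nat.le_max_left 1 _
        have : segW p ≤ stackW (p :: rest) := by
          unfold stackW; simp only [List.map_cons, List.sum_cons]; omega
        omega
      omega
  | succ f ih =>
    cases stack with
    | nil => simp [altLoopF]
    | cons p rest =>
      obtain ⟨lo, hi⟩ := p
      have hW : stackW ((lo, hi) :: rest) = segW (lo, hi) + stackW rest := by
        unfold stackW; simp [List.map_cons, List.sum_cons]
      have hw1 : 1 ≤ segW (lo, hi) := Nat.le_max_left 1 _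
      rw [altLoopF]
      by_cases h0 : hi - lo = 0
      · rw [if_pos h0, ih rest out (by omega) (fun p hp => hst p (List.mem_cons_of_mem _ hp))]
        simp [h0, processA_nil]
      · by_cases h1 : hi - lo = 1
        · have hhi : hi ≤ row.length := by
            have := hst (lo, hi) (List.mem_cons_self ..); simpa using this
          have hlo : lo < row.length := by omega
          rw [if_neg h0, if_pos h1,
              ih rest _ (by omega) (fun p hp => hst p (List.mem_cons_of_mem _ hp))]
          have hseg : (row.drop lo).take (hi - lo) = [row[lo]] := by
            rw [List.drop_eq_getElem_cons hlo, h1]; rfl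
          simp [hseg, processA_one, List.getElem?_eq_getElem hlo]
        · by_cases h2 : hi - lo = 2
          · have hhi : hi ≤ row.length := by
              have := hst (lo, hi) (List.mem_cons_self ..); simpa using this
            have hlo1 : lo + 1 < row.length := by omega
            have hlo : lo < row.length := by omega
            rw [if_neg h0, if_neg h1, if_pos h2,
                ih rest _ (by omega) (fun p hp => hst p (List.mem_cons_of_mem _ hp))]
            have hseg : (row.drop lo).take (hi - lo) = [row[lo], row[lo+1]] := by
              rw [List.drop_eq_getElem_cons hlo, h2, List.drop_eq_getElem_cons hlo1]; rfl
            simp [hseg, processA_two, List.getElem?_eq_getElem hlo, List.getElem?_eq_getElem hlo1]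
          · have hhi : hi ≤ row.length := by
              have := hst (lo, hi) (List.mem_cons_self ..); simpa using this
            have h3 : 3 ≤ hi - lo := by omega
            have hsplit := splitW_lt lo hi h3
            have hW2 : stackW ((lo, lo + (hi - lo) / 2) :: (lo + (hi - lo) / 2, hi) :: rest)
                = segW (lo, lo + (hi - lo) / 2) + segW (lo + (hi - lo) / 2, hi) + stackW rest := by
              unfold stackW; simp [List.map_cons, List.sum_cons]; omega
            have hrec : ∀ p ∈ ((lo, lo + (hi - lo) / 2) :: (lo + (hi - lo) / 2, hi) :: rest),
                p.2 ≤ row.length := by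
              intro p hp
              simp only [List.mem_cons] at hp
              rcases hp with h | h | h
              · subst h; simp; omega
              · subst h; simp; omega
              · exact hst p (List.mem_cons_of_mem _ h)
            rw [if_neg h0, if_neg h1, if_neg h2, ih _ out (by omega) hrec]
            have hlen : ((row.drop lo).take (hi - lo)).length = hi - lo := by
              simp; omega
            have hge : 3 ≤ ((row.drop lo).take (hi - lo)).length := by rw [hlen]; exact h3
            simp only [List.map_cons, List.flatten_cons]
            rw [processA_split _ hge, hlen]
            have e1 : ((row.drop lo).take (hi - lo)).take ((hi - lo) / 2)
                = (row.drop lo).take ((lo + (hi - lo) / 2) - lo) := by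
              rw [List.take_take]; congr 1; omega
            have e2 : ((row.drop lo).take (hi - lo)).drop ((hi - lo) / 2)
                = (row.drop (lo + (hi - lo) / 2)).take (hi - (lo + (hi - lo) / 2)) := by
              rw [List.drop_take, List.drop_drop]
              congr 1
              omega
            rw [e1, e2]
            simp only [List.append_assoc]

-- A's swap loop reverses the designated segment (fuel ≥ mid.length - 1 suffices)
lemma swapLoopF_spec (f : Nat) (mid front back : List Int) (hf : mid.length ≤ f + 1) :
    swapLoopF f (front ++ mid ++ back) (front.length : Int)
        ((front.length : Int) + (mid.length : Int) - 1)
      = front ++ mid.reverse ++ back := by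
  induction f generalizing mid front back with
  | zero =>
    match mid, hf with
    | [], _ => simp [swapLoopF]
    | [x], _ => simp [swapLoopF]
  | succ f ih =>
    match mid, hf with
    | [], _ => rw [swapLoopF, if_neg (by simp)]; simp
    | [x], _ => rw [swapLoopF, if_neg (by simp)]; simp
    | x :: y :: t, hf =>
      -- mid = x :: ys ++ [z]
      have ht : y :: t ≠ [] := by simp
      obtain ⟨ys, z, hyz⟩ : ∃ ys z, y :: t = ys ++ [z] :=
        ⟨(y :: t).dropLast, (y :: t).getLast ht, (List.dropLast_concat_getLast ht).symm⟩
      have hlent : ys.length = t.length := by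
        have := congrArg List.length hyz; simp at this; omega
      rw [hyz]
      rw [swapLoopF, if_pos (by simp; omega)]
      have hflat : front ++ (x :: (ys ++ [z])) ++ back = front ++ x :: (ys ++ z :: back) := by
        simp
      have hhigh : (front.length : Int) + ((x :: (ys ++ [z])).length : Int) - 1
          = (((front ++ x :: ys).length : Nat) : Int) := by
        simp; omega
      simp only [hflat, hhigh, PySem.List.pyGetD_natCast, PySem.List.pySetD_natCast]
      have g1 : (front ++ x :: (ys ++ z :: back)).getD front.length 0 = x := by
        rw [List.getD_eq_getElem _ _ (by simp), List.getElem_append_right (Nat.le_refl _)]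
        simp
      have g2 : (front ++ x :: (ys ++ z :: back)).getD (front ++ x :: ys).length 0 = z := by
        rw [show front ++ x :: (ys ++ z :: back) = (front ++ x :: ys) ++ z :: back by simp,
            List.getD_eq_getElem _ _ (by simp), List.getElem_append_right (Nat.le_refl _)]
        simp
      rw [g1, g2]
      have s1 : (front ++ x :: (ys ++ z :: back)).set front.length z
          = front ++ z :: (ys ++ z :: back) := by
        rw [List.set_append_right _ _ (Nat.le_refl _)]; simp
      rw [s1]
      have s2 : (front ++ z :: (ys ++ z :: back)).set (front ++ x :: ys).length x
          = (front ++ z :: ys) ++ x :: back := by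
        rw [show front ++ z :: (ys ++ z :: back) = (front ++ z :: ys) ++ z :: back by simp,
            show (front ++ x :: ys).length = (front ++ z :: ys).length by simp,
            List.set_append_right _ _ (Nat.le_refl _)]
        simp
      rw [s2]
      have key := ih ys (front ++ [z]) (x :: back) (by simp at hf ⊢; omega)
      simp only [List.append_assoc, List.cons_append, List.nil_append, List.length_append,
        List.length_cons, List.length_nil, List.reverse_cons, List.reverse_append,
        List.reverse_nil] at key ⊢
      push_cast at key ⊢
      ring_nf at key ⊢
      exact key

lemma swapLoopF_reverse (l : List Int) :
    swapLoopF l.length l 0 ((l.length : Int) - 1) = l.reverse := by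
  cases l with
  | nil => simp [swapLoopF]
  | cons a t =>
    have h := swapLoopF_spec (a :: t).length (a :: t) [] [] (by simp)
    simpa using h

lemma row_eq (row : List Int) :
    processA row = altLoopF (2 * row.length + 1) row [(0, row.length)] [] := by
  rw [altLoopF_eq _ row [(0, row.length)] []
        (by unfold stackW segW; simp; omega) (by simp)]
  simp

-- ===== VERDICT (by name: the statement is the Claim_ definition above) =====
theorem func11_spec : Claim_equal_func11 := by
  intro grid reverse _
  unfold Spec_func11 func11 func11_alt
  apply List.map_congr_left
  intro row _
  rw [← row_eq]
  cases reverse <;> simp [swapLoopF_reverse]
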